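/- GENERATED by mk_final_copies.py from the proof of the farm's unit `setup_malloc` (farm:setup_malloc.2: Proof.lean) as the
   re-elaboration sweep compiled it — do not edit. -/
import Asan.CheckWalk
import Vorbis.Spec.Units.setup_malloc

/-
  UNIT `setup_malloc` (0x108f20 … 0x10901c, 66 instructions, stb_vorbis_fixed.c:962–974).

  The shape of the function, as the walk sees it (ONE `u_walk` from the entry; the `malloc` arm `alloc_buffer = 0` is pruned by the
  walker: `r1` makes `r13 = A.B`, and AR1 says `0 < A.B`):

      0x108f2e  cmp esi, 0x7ffffff8 ; ja     FIX A's first test (unsigned: refuses `sz < 0` and `sz > INT_MAX − 7`)   → ret, rax = 0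
      0x108f43  load8 f+112                  alloc_buffer
      0x108f58  load4 f+132, 0x108f6b load4 f+128 ; cmp ; jl      the guard `sz > T − S`                              → ret, rax = 0
      0x108f8c  load4 f+8 ; add [f+8], r12d  setup_memory_required += r8 sz
      0x108fa1  load4 f+128 ; 0x108fc1 load4 f+132 ; cmp ; jg     the exact-fit test `S + 32 + r8 sz > T`             → ret, rax = 0
      0x108fcf  mov [f+128], r15d            setup_offset = S + 32 + r8 sz
      0x108fdc  call arena_unpoison(B + S + 32, sext sz)          the walk stops after the return; a second `u_walk` to the `ret`

  The three tests decide `A.Fits n` (Vorbis/Spec/Alloc.lean: `fits_of_tests`, `not_fits_of_guard`, `not_fits_of_exact`,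
  `not_fits_of_big`); the post on either side is a lemma below (`fail_post`, `success_post`), so that the walk's goals are only
  the memory facts (`u_eqon`, `u_read`, `u_same`).
-/

open X86 X86.User Asan Vorbis Vorbis.Spec

set_option maxRecDepth 4000
set_option maxHeartbeats 4000000

namespace Vorbis.Spec.setup_malloc

/-- **The numbers of the success path**, from the three branch conditions in the walker's form (`x` = the low half of rsi): the
request fits; `r13 = rdi = B + sext S + 32` (0x108fb0, the pointer handed to `arena_unpoison` and returned) is `B + S + 32`;
`movsxd rsi, ebp` (0x108fd6) is the size itself; `r15d` (0x108fb5, the value stored to `setup_offset`) is `S + 32 + r8 sz`. -/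
theorem success_numbers {A : Arena} (hb : A.S ≤ A.T ∧ A.T ≤ A.L ∧ A.L ≤ 0xB00000 ∧ A.B + A.L ≤ 0xC00000)
    (x : BitVec 32) (h1 : x.toNat ≤ 0x7FFFFFF8)
    (hg : ¬ (BitVec.ofNat 32 A.T - BitVec.ofNat 32 A.S).toInt < x.toInt)
    (hx : ¬ (BitVec.ofNat 32 A.T).toInt <
      (BitVec.setWidth 32 (Word.ofBV (BitVec.ofNat 32 A.S) +
        Word.ofBV (BitVec.setWidth 32 (Word.ofBV x + 7).toBitVec &&& 4294967288#32) + 32).toBitVec).toInt) :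
    A.Fits x.toNat ∧
    (UInt64.ofNat A.B + Word.ofBV (BitVec.signExtend 64 (BitVec.ofNat 32 A.S)) + 32).toNat = A.B + A.S + 32 ∧
    (Word.ofBV (BitVec.signExtend 64 x)).toNat = x.toNat ∧
    (BitVec.setWidth 32 (Word.ofBV (BitVec.ofNat 32 A.S) +
        Word.ofBV (BitVec.setWidth 32 (Word.ofBV x + 7).toBitVec &&& 4294967288#32) + 32).toBitVec).toNat =
      A.S + 32 + r8 x.toNat := by
  have hfit := setup_malloc.fits_of_tests hb x h1 hg hx
  have hfit' : A.S + 32 + r8 x.toNat ≤ A.T := hfit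
  refine ⟨hfit, ?_, ?_, ?_⟩
  · -- the pointer: nothing wraps, `S < 2^31` is its own sign extension
    have eS0 : (BitVec.ofNat 32 A.S).toNat = A.S := toNat_ofNat32 A.S (by omega)
    have eS : (Word.ofBV (BitVec.signExtend 64 (BitVec.ofNat 32 A.S))).toNat = A.S := by
      rw [toNat_sext32 _ (by rw [eS0]; omega), eS0]
    have eB : (UInt64.ofNat A.B).toNat = A.B :=
      UInt64.toNat_ofNat_of_lt' (by show A.B < 18446744073709551616; omega)
    have e32 : (32 : Word).toNat = 32 := rfl
    rw [UInt64.toNat_add, UInt64.toNat_add, eS, eB, e32]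
    omega
  · -- the size: non-negative after FIX A's first test
    exact toNat_sext32 x (by omega)
  · -- the new `setup_offset`
    have er := r8_lea x h1
    have e2 := toNat_lea32 (BitVec.ofNat 32 A.S) (BitVec.setWidth 32 (Word.ofBV x + 7).toBitVec &&& 4294967288#32)
    rw [er, toNat_ofNat32 A.S (by omega)] at e2
    rw [e2]
    omega

/-- **The post on a failing path** (one of the three tests refused: `¬ A.Fits n`): rax = 0, the four arena fields
`[f + 112, f + 136)` read as at the entry (only the stack and, after the guard, `setup_memory_required` were written), no store
went to the shadow; `hsame`: the footprint of a failed call (the 80 bytes of stack and `setup_memory_required`, nothing else: the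
last conjunct of the failure clause, freeze-9). -/
theorem fail_post {A : Arena} {others : List Obj} {frames : List (Nat × FrameLayout)} {u v : State}
    (hpre : ArenaPre A others frames u)
    (hnf : ¬ A.Fits ((u.reg .rsi).toNat % 2 ^ 32))
    (hrax : v.reg .rax = 0)
    (hf : (u.reg .rdi).toNat + 1808 ≤ 2 ^ 64)
    (heq : Mem.EqOn ((u.reg .rdi).toNat + 112) ((u.reg .rdi).toNat + 136) u.mem v.mem)
    (hun : ShadowUntouched u.mem v.mem)
    (hsame : Mem.SameExcept
      [⟨(u.reg .rsp).toNat - 80, (u.reg .rsp).toNat⟩, ⟨(u.reg .rdi).toNat + 8, (u.reg .rdi).toNat + 12⟩] u.mem v.mem) :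
    (setup_malloc.spec others frames A).post u v := by
  refine ⟨fun h => absurd h hnf, fun _ => ⟨hrax, ?_, hun, hsame⟩⟩
  apply hpre.arena.move
  apply hpre.arena.AR5.frame
  · simp only [voff]
    exact hf
  · simp only [voff]
    exact heq

/-- **The post on the success path** (`A.Fits n`). `m2` is the memory at the call of `arena_unpoison` (0x108fdc): no shadow byte
written so far, `alloc_buffer`, the length and `temp_offset` as at the entry, `setup_offset` holds the new `S`; the final memory
is `unpoisonMem m2 (B + S + 32) n`, rax is the new block. The arena layer: `ArenaOK.setup_malloc` + `ArenaFields.set_setup`; the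
shadow layer: `ArenaOK.shadow_setup_malloc`. -/
theorem success_post {A : Arena} {others : List Obj} {frames : List (Nat × FrameLayout)} {u v : State} {m2 : Mem}
    (hpre : ArenaPre A others frames u)
    (hfit : A.Fits ((u.reg .rsi).toNat % 2 ^ 32))
    (hf : (u.reg .rdi).toNat + 1808 ≤ 0xC00000)
    (hun : ShadowUntouched u.mem m2)
    (heq1 : Mem.EqOn ((u.reg .rdi).toNat + 112) ((u.reg .rdi).toNat + 128) u.mem m2)
    (heq2 : Mem.EqOn ((u.reg .rdi).toNat + 132) ((u.reg .rdi).toNat + 136) u.mem m2)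
    (hS : m2.readLE (u.reg .rdi + 128) 4 = A.S + 32 + r8 ((u.reg .rsi).toNat % 2 ^ 32))
    (hv : v.mem = unpoisonMem m2 (A.B + A.S + 32) ((u.reg .rsi).toNat % 2 ^ 32))
    (hrax : (v.reg .rax).toNat = A.B + A.S + 32) :
    (setup_malloc.spec others frames A).post u v := by
  have hA := hpre.arena
  have hb := hA.bounds
  have h1 := hA.AR1
  have h2 := hA.AR2
  have hfit' : A.S + 32 + r8 ((u.reg .rsi).toNat % 2 ^ 32) ≤ A.T := hfit
  have hr := le_r8 ((u.reg .rsi).toNat % 2 ^ 32)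
  -- `arena_unpoison` writes shadow bytes only
  have hdata : Mem.EqOn 0 0xC00000 m2 v.mem := by
    rw [hv]
    exact dataSame_unpoisonMem m2 _ _ (by omega) (by omega)
  refine ⟨fun _ => ⟨hrax, ?_, ?_⟩, fun hnf => absurd hfit hnf⟩
  · -- the arena layer: AR5 with the new `setup_offset`, the ghost transition
    apply hA.setup_malloc _ hfit
    apply hA.AR5.set_setup (by simp only [voff]; omega) (A.pushSetup _) rfl rfl rfl
    · simp only [voff]
      exact heq1.trans (hdata.mono (by omega) (by omega))
    · simp only [voff]
      exact heq2.trans (hdata.mono (by omega) (by omega))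
    · simp only [vacc, voff, varena]
      rw [hdata.i32 _ (by omega) (by omega) (by omega), Mem.i32_def, Mem.u32, ← readLE_field m2 (u.reg .rdi) 128 4]
      have hS' : m2.readLE (u.reg .rdi + UInt64.ofNat 128) 4 = A.S + 32 + r8 ((u.reg .rsi).toNat % 2 ^ 32) := hS
      rw [hS']
      have := sint32_cases (A.S + 32 + r8 ((u.reg .rsi).toNat % 2 ^ 32))
      omega
  · -- the shadow layer: the new block is one more live object
    rw [hv]
    exact hA.shadow_setup_malloc (hpre.shadow.inv.untouched hun) _ hfit

end Vorbis.Spec.setup_malloc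

/-- `setup_malloc(f, sz)` satisfies its contract: six checked loads inside `*f`, three tests that decide `A.Fits`, two unchecked
stores to `*f` (`setup_memory_required`, `setup_offset`), one call of `arena_unpoison` for the new block. -/
theorem Vorbis.Spec.Worked.setup_malloc_ok : Vorbis.Spec.setup_malloc.Statement := by
  intro Lay hLay μ hμ u₀ hcode hload8 hload4 hunp hmal others frames A u ret he hpre
  v_entry he
  have hmal' := hmal others frames
  have hsh := hpre.shadow
  have hobj := hpre.obj
  have hA := hpre.arena
  -- where `*f` is, and the ranges of the arena's numbers: arithmetic facts for the side conditions of the walk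
  have hsp := hsh.rsp
  have hwhere := hobj.where_ hsh.inv hsh.offText (by omega)
  have hb := hA.bounds
  have h1 := hA.AR1
  have h1x := hA.AR1x
  have h2 := hA.AR2
  -- the three loads of `*f` as facts: every branch condition speaks of A.B, A.S, A.T (and the `malloc` arm is pruned)
  have r1 := hpre.read_buffer
  have r2 := hpre.read_setup
  have r3 := hpre.read_temp
  -- `sz` read unsigned is the low half of rsi
  have hn : (Word.part Width.w32 (u.reg Reg.rsi)).toNat = (u.reg .rsi).toNat % 2 ^ 32 := Asan.part32_toNat _
  u_walk hcode [hμ.vendor] span [Vorbis.L.textLo, Vorbis.L.textHi] side (v_side)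
  case check_108f43 =>
    -- 0x108f43 (C line 963): load8 `f->alloc.alloc_buffer`, `[f + 112, f + 120)` inside `*f`
    have hun : ShadowUntouched u.mem s_108f43.mem := by v_untouched
    exact hobj.accSmall hsh.inv hun _ 8 (by decide) (by u_omega) (by u_omega)
  case check_108f58 =>
    -- 0x108f58 (C line 963): load4 `f->temp_offset`, `[f + 132, f + 136)`
    have hun : ShadowUntouched u.mem s_108f58.mem := by v_untouched
    exact hobj.accSmall hsh.inv hun _ 4 (by decide) (by u_omega) (by u_omega)
  case check_108f6b =>
    -- 0x108f6b (C line 963): load4 `f->setup_offset`, `[f + 128, f + 132)`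
    have hun : ShadowUntouched u.mem s_108f6b.mem := by v_untouched
    exact hobj.accSmall hsh.inv hun _ 4 (by decide) (by u_omega) (by u_omega)
  case check_108f8c =>
    -- 0x108f8c (C line 965): load4 `f->setup_memory_required`, `[f + 8, f + 12)` (the store half of `+=` is unchecked)
    have hun : ShadowUntouched u.mem s_108f8c.mem := by v_untouched
    exact hobj.accSmall hsh.inv hun _ 4 (by decide) (by u_omega) (by u_omega)
  case check_108fa1 =>
    -- 0x108fa1 (C line 967): load4 `f->setup_offset`
    have hun : ShadowUntouched u.mem s_108fa1.mem := by v_untouched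
    exact hobj.accSmall hsh.inv hun _ 4 (by decide) (by u_omega) (by u_omega)
  case check_108fc1 =>
    -- 0x108fc1 (C line 968): load4 `f->temp_offset`
    have hun : ShadowUntouched u.mem s_108fc1.mem := by v_untouched
    exact hobj.accSmall hsh.inv hun _ 4 (by decide) (by u_omega) (by u_omega)
  case call_inv =>
    -- 0x108fdc: DF and the MXCSR masks at the entry of `arena_unpoison`
    v_inv
  case pre_108fdc =>
    -- 0x108fdc (C line 970): `arena_unpoison(p, size)`: `p = B + S + 32` is 8-aligned, in the data space, `p + sz ≤ B + T`
    obtain ⟨hfit, eP, eN, eV⟩ := Vorbis.Spec.setup_malloc.success_numbers hb _ hbr_108f34 hbr_108f7a hbr_108fcd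
    have hfit' : A.S + 32 + r8 (Word.part Width.w32 (u.reg Reg.rsi)).toNat ≤ A.T := hfit
    have hr := le_r8 (Word.part Width.w32 (u.reg Reg.rsi)).toNat
    show (s_108fdc.reg .rdi).toNat % 8 = 0 ∧ 0x100000 ≤ (s_108fdc.reg .rdi).toNat ∧
      (s_108fdc.reg .rdi).toNat + (s_108fdc.reg .rsi).toNat ≤ 0xC00000
    rw [w_rdi, w_rsi, eP, eN]
    omega
  · -- 0x108f34 taken (C line 963, FIX A's first test: `sz < 0 ∨ sz > INT_MAX − 7`): `return NULL`, only the pushes were stored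
    refine ReachVia.done ?_
    v_returned
    apply Vorbis.Spec.setup_malloc.fail_post hpre ?_ w_rax (by omega) ?_ ?_ ?_
    · rw [← hn]
      exact Vorbis.Spec.not_fits_of_big hA _ hbr_108f34
    · rw [w_mem]
      u_eqon
    · v_untouched
    · -- the footprint of a failed call: the pushes, the return addresses of the checks, (after the guard) `[f + 8, f + 12)`
      u_same
  · -- 0x108f7a taken (C line 963, the guard `sz > temp_offset − setup_offset`): `return NULL`
    refine ReachVia.done ?_
    v_returned
    apply Vorbis.Spec.setup_malloc.fail_post hpre ?_ w_rax (by omega) ?_ ?_ ?_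
    · rw [← hn]
      exact Vorbis.Spec.setup_malloc.not_fits_of_guard hb _ hbr_108f34 hbr_108f7a
    · rw [w_mem]
      u_eqon
    · v_untouched
    · -- the footprint of a failed call: the pushes, the return addresses of the checks, (after the guard) `[f + 8, f + 12)`
      u_same
  · -- 0x108fcd taken (C line 968, the exact-fit test): `return NULL`; `setup_memory_required` has been updated, the arena not
    refine ReachVia.done ?_
    v_returned
    apply Vorbis.Spec.setup_malloc.fail_post hpre ?_ w_rax (by omega) ?_ ?_ ?_
    · rw [← hn]
      exact Vorbis.Spec.setup_malloc.not_fits_of_exact hb _ hbr_108f34 hbr_108f7a hbr_108fcd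
    · rw [w_mem]
      u_eqon
    · v_untouched
    · -- the footprint of a failed call: the pushes, the return addresses of the checks, (after the guard) `[f + 8, f + 12)`
      u_same
  · -- the success path, after the return of `arena_unpoison` (cut point 0x108fe1, C line 974)
    obtain ⟨hfit, eP, eN, eV⟩ := Vorbis.Spec.setup_malloc.success_numbers hb _ hbr_108f34 hbr_108f7a hbr_108fcd
    have hfit' : A.S + 32 + r8 (Word.part Width.w32 (u.reg Reg.rsi)).toNat ≤ A.T := hfit
    have hr := le_r8 (Word.part Width.w32 (u.reg Reg.rsi)).toNat
    -- the callee's post: the memory is `unpoisonMem` of the memory at the call, in OUR numbers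
    obtain ⟨hmem, hkeep⟩ : s_108fdcr.mem = unpoisonMem s_108fdc.mem (s_108fdc.reg .rdi).toNat (s_108fdc.reg .rsi).toNat ∧
        Keeps clobArena s_108fdc s_108fdcr := w_post
    rw [w_rdi_108fdc, w_rsi_108fdc, eP, eN] at hmem
    -- `arena_unpoison` wrote shadow bytes only: the data space (the stack, `*f`) reads the same
    have hdata : Mem.EqOn 0 0xC00000 s_108fdc.mem s_108fdcr.mem := by
      rw [hmem]
      exact dataSame_unpoisonMem _ _ _ (by omega) (by omega)
    v_after_call w_rsp_108fdc w_mem_108fdc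
    clear w_same
    -- (kept reversed: the walker would take `s.mem = …` for its own memory fact and read the stack slots through it)
    have hmem' := hmem.symm
    clear hmem
    -- the seven stack slots the epilogue reads, carried over the call
    have hs0 : UInt64.ofNat (s_108fdcr.mem.readLE (u.reg .rsp) 8) = ret := by
      have h0 : UInt64.ofNat (s_108fdc.mem.readLE (u.reg .rsp) 8) = ret := by
        rw [w_mem_108fdc]
        u_frame he_retAddr
      exact Mem.ofNat_readLE_frame h0 (hdata.mono (Nat.zero_le _) (by u_omega)) (by u_omega)
    have hs1 : UInt64.ofNat (s_108fdcr.mem.readLE (u.reg .rsp - 8) 8) = u.reg .r15 := by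
      have h0 : UInt64.ofNat (s_108fdc.mem.readLE (u.reg .rsp - 8) 8) = u.reg .r15 := by u_resolve
      exact Mem.ofNat_readLE_frame h0 (hdata.mono (Nat.zero_le _) (by u_omega)) (by u_omega)
    have hs2 : UInt64.ofNat (s_108fdcr.mem.readLE (u.reg .rsp - 16) 8) = u.reg .r14 := by
      have h0 : UInt64.ofNat (s_108fdc.mem.readLE (u.reg .rsp - 16) 8) = u.reg .r14 := by u_resolve
      exact Mem.ofNat_readLE_frame h0 (hdata.mono (Nat.zero_le _) (by u_omega)) (by u_omega)
    have hs3 : UInt64.ofNat (s_108fdcr.mem.readLE (u.reg .rsp - 24) 8) = u.reg .r13 := by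
      have h0 : UInt64.ofNat (s_108fdc.mem.readLE (u.reg .rsp - 24) 8) = u.reg .r13 := by u_resolve
      exact Mem.ofNat_readLE_frame h0 (hdata.mono (Nat.zero_le _) (by u_omega)) (by u_omega)
    have hs4 : UInt64.ofNat (s_108fdcr.mem.readLE (u.reg .rsp - 32) 8) = u.reg .r12 := by
      have h0 : UInt64.ofNat (s_108fdc.mem.readLE (u.reg .rsp - 32) 8) = u.reg .r12 := by u_resolve
      exact Mem.ofNat_readLE_frame h0 (hdata.mono (Nat.zero_le _) (by u_omega)) (by u_omega)
    have hs5 : UInt64.ofNat (s_108fdcr.mem.readLE (u.reg .rsp - 40) 8) = u.reg .rbp := by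
      have h0 : UInt64.ofNat (s_108fdc.mem.readLE (u.reg .rsp - 40) 8) = u.reg .rbp := by u_resolve
      exact Mem.ofNat_readLE_frame h0 (hdata.mono (Nat.zero_le _) (by u_omega)) (by u_omega)
    have hs6 : UInt64.ofNat (s_108fdcr.mem.readLE (u.reg .rsp - 48) 8) = u.reg .rbx := by
      have h0 : UInt64.ofNat (s_108fdc.mem.readLE (u.reg .rsp - 48) 8) = u.reg .rbx := by u_resolve
      exact Mem.ofNat_readLE_frame h0 (hdata.mono (Nat.zero_le _) (by u_omega)) (by u_omega)
    -- 0x108fe1 … 0x108ff2: `mov rax, r13 ; add rsp, 8 ; pop rbx rbp r12 r13 r14 r15 ; ret`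
    u_walk hcode [hμ.vendor] span [Vorbis.L.textLo, Vorbis.L.textHi] side (v_side)
    refine ReachVia.done ?_
    v_returned
    · -- the post: the arena layer and the shadow layer with the new block
      apply Vorbis.Spec.setup_malloc.success_post hpre (m2 := s_108fdc.mem) ?_ (by omega) ?_ ?_ ?_ ?_ ?_ ?_
      · rw [← hn]
        exact hfit
      · -- no store of this function went to the shadow
        show Mem.EqOn 0xC00000 0xE00000 u.mem s_108fdc.mem
        rw [w_mem_108fdc]
        u_eqon
      · -- `alloc_buffer`, the length: as at the entry
        rw [w_mem_108fdc]
        u_eqon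
      · -- `temp_offset`: as at the entry
        rw [w_mem_108fdc]
        u_eqon
      · -- `setup_offset`: the value stored at 0x108fcf
        rw [← hn, ← eV, w_mem_108fdc]
        u_read
      · -- the final memory
        rw [w_mem, ← hmem', hn]
      · -- the returned pointer
        rw [w_rax, eP]
    · -- the footprint: the stores of this function, then the shadow stores of `arena_unpoison`
      simp only [X86.User.Spec.footprint, vspec]
      have hsB := unpoisonMem_sameExcept s_108fdc.mem (A.B + A.S + 32) (Word.part Width.w32 (u.reg Reg.rsi)).toNat
        (by omega) (by omega)
      rw [hmem', hn] at hsB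
      rw [w_mem]
      refine Mem.SameExcept.trans (ν := s_108fdc.mem) ?_ ?_
      · rw [w_mem_108fdc]
        u_same
      · refine hsB.mono ?_
        intro w hw a k1 k2
        refine ⟨w, ?_, k1, k2⟩
        rw [List.mem_singleton.mp hw]
        exact List.mem_cons_of_mem _ (List.mem_cons_of_mem _ (List.mem_cons_of_mem _ List.mem_cons_self))
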